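-- pv_equiv track=rewrite | github.com/Ddd1101/ShopTools | main.py | SplitChineseAndPinyin
-- ===== SOURCE A (Python) =====
-- def SplitChineseAndPinyin(shopNameRaw):
--     ret = -1
--
--     for i in range(len(shopNameRaw)):
--         if (shopNameRaw[i] >= "a" and shopNameRaw[i] <= "z") or (
--             shopNameRaw[i] >= "A" and shopNameRaw[i] <= "Z"
--         ):
--             break
--         ret = i
--     return ret
-- ===== SOURCE B (Python) =====
-- import re
--
-- def SplitChineseAndPinyin(shopNameRaw):
--     m = re.search(r"[a-zA-Z]", shopNameRaw)
--     if m is not None: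
--         return m.start() - 1
--     return len(shopNameRaw) - 1
-- ===== Notes on version B (the rewrite author's own statement) =====
-- stated objective: idiomatic
-- what changed: B replaces the explicit indexed loop with leftover-variable state by a single re.search for the first ASCII letter, returning its start index minus one (or len-1 when no letter occurs).
import Mathlib
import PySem

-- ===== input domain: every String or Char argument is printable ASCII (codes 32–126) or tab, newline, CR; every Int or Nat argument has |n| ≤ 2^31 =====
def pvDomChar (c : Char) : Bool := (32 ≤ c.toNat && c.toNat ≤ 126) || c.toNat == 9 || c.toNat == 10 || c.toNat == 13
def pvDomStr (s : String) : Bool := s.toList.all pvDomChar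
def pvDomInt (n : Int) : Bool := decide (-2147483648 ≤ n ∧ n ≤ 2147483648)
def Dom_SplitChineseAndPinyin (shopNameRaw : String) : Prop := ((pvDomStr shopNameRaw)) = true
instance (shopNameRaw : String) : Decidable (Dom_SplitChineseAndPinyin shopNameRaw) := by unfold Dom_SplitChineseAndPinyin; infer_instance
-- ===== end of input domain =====

-- B replaces A's indexed loop (with its leftover `ret` state) by a regex-style first-match
-- search for an ASCII letter; same return value, stated idiomatically.

-- ===== PORT A =====
-- the ASCII-letter test exactly as A writes it (char range comparisons)
def pvIsAsciiLetter (c : Char) : Bool := ('a' ≤ c && c ≤ 'z') || ('A' ≤ c && c ≤ 'Z')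

-- A's loop: for i in range(len), break on letter, else ret = i
def pvLoopA : List Char → Int → Int → Int
  | [], _, ret => ret
  | c :: cs, i, ret => if pvIsAsciiLetter c then ret else pvLoopA cs (i + 1) i

def SplitChineseAndPinyin (shopNameRaw : String) : Int :=
  pvLoopA shopNameRaw.toList 0 (-1)

-- ===== PORT B =====
-- re.search(r"[a-zA-Z]", s): index of the first match, as an Option (none = no match)
def SplitChineseAndPinyin_alt (shopNameRaw : String) : Int :=
  match shopNameRaw.toList.findIdx? pvIsAsciiLetter with
  | some j => (j : Int) - 1
  | none => (shopNameRaw.toList.length : Int) - 1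

-- ===== PRECONDITION & SPEC =====
def Spec_SplitChineseAndPinyin (shopNameRaw : String) (out : Int) : Prop := out = SplitChineseAndPinyin_alt shopNameRaw
instance (shopNameRaw : String) (out : Int) : Decidable (Spec_SplitChineseAndPinyin shopNameRaw out) := by unfold Spec_SplitChineseAndPinyin; infer_instance

-- ===== CLAIM (what is proved, stated in full; the proofs are below) =====
def Claim_equal_SplitChineseAndPinyin : Prop := ∀ (shopNameRaw : String), Dom_SplitChineseAndPinyin shopNameRaw → Spec_SplitChineseAndPinyin shopNameRaw (SplitChineseAndPinyin shopNameRaw)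

-- ===== LEMMAS AND PROOFS =====
theorem pvLoopA_inv (l : List Char) (i : Int) :
    pvLoopA l i (i - 1) =
      match l.findIdx? pvIsAsciiLetter with
      | some j => i + (j : Int) - 1
      | none => i + (l.length : Int) - 1 := by
  induction l generalizing i with
  | nil => simp [pvLoopA]
  | cons c cs ih =>
    simp only [pvLoopA, List.findIdx?_cons]
    by_cases h : pvIsAsciiLetter c = true
    · simp [h]
    · simp only [h, if_neg, Bool.false_eq_true, not_false_eq_true]
      have ih' := ih (i + 1)
      have e : i + 1 - 1 = i := by ring
      rw [e] at ih'
      rw [ih']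
      cases hf : cs.findIdx? pvIsAsciiLetter with
      | none => simp [hf]; push_cast; ring
      | some j => simp [hf]; push_cast; ring

-- ===== VERDICT (by name: the statement is the Claim_ definition above) =====
theorem SplitChineseAndPinyin_spec : Claim_equal_SplitChineseAndPinyin := by
  intro s _
  unfold Spec_SplitChineseAndPinyin SplitChineseAndPinyin SplitChineseAndPinyin_alt
  have h := pvLoopA_inv s.toList 0
  norm_num at h
  rw [h]
  cases hf : s.toList.findIdx? pvIsAsciiLetter <;> simp
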